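-- pv_equiv track=rewrite | github.com/DaniDotExe/ecuation2table | table2ecuation.py | format_equation_pretty
-- ===== SOURCE A (Python) =====
-- def format_equation_pretty(equation: str, max_line_length: int = 100) -> str:
--     """
--     Formatea la ecuación de manera más legible con saltos de línea.
--
--     Args:
--         equation (str): Ecuación a formatear
--         max_line_length (int): Longitud máxima de línea antes del salto
--
--     Returns:
--         str: Ecuación formateada con saltos de línea
--     """
--     # Dividir por AND para formatear cada grupo en una línea
--     and_parts = equation.split(' AND ')
--
--     formatted_parts = []
--     for i, part in enumerate(and_parts):
--         if i == 0:
--             formatted_parts.append(part)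
--         else:
--             formatted_parts.append(f"AND {part}")
--
--     # Unir con saltos de línea si es muy largo
--     if len(equation) > max_line_length:
--         return ' \n'.join(formatted_parts)
--     else:
--         return equation
-- ===== SOURCE B (Python) =====
-- def format_equation_pretty(equation: str, max_line_length: int = 100) -> str:
--     # Same result by a single substitution: joining the ' AND '-split parts with
--     # ' \n' while prefixing later parts with 'AND ' is exactly replacing every
--     # ' AND ' separator by ' \nAND '.
--     if len(equation) > max_line_length:
--         return equation.replace(' AND ', ' \nAND ')
--     return equation
-- ===== Notes on version B (the rewrite author's own statement) =====
-- stated objective: simpler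
-- what changed: Replaced the split/enumerate-loop/conditional-prefix/join construction with a single replace(' AND ', ' \nAND ') call in the long branch, proved equal via the split-join/replace identity.
import Mathlib
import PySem

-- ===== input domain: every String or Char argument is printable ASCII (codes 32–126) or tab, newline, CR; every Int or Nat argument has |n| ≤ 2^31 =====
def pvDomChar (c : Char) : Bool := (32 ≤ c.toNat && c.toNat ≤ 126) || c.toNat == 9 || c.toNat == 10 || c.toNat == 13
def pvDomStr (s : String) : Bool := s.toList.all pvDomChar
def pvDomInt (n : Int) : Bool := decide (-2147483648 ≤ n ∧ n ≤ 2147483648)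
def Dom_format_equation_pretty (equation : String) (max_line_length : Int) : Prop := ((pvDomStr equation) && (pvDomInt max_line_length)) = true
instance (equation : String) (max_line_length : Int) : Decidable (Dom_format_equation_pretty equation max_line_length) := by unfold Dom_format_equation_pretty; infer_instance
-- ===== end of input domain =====

-- B replaces A's split/enumerate-loop/join construction with one replace(' AND ', ' \nAND ') call (simpler).
-- Strings are ported on their code-point lists (PySem.Chars), exact on the ASCII domain.

-- ===== PORT A =====
def format_equation_pretty (equation : String) (max_line_length : Int) : String :=
  -- and_parts = equation.split(' AND ')  (separator is a nonempty literal, so split never raises)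
  let and_parts := PySem.Chars.splitOn equation.toList " AND ".toList
  -- for i, part in enumerate(and_parts): append part (i == 0) or "AND " + part
  let formatted_parts := (PySem.List.enumerate and_parts).foldl
      (fun acc ip => if ip.1 = 0 then acc ++ [ip.2] else acc ++ ["AND ".toList ++ ip.2]) []
  if PySem.Str.len equation > max_line_length then
    String.ofList (PySem.Chars.join " \n".toList formatted_parts)
  else equation

-- ===== PORT B =====
def format_equation_pretty_alt (equation : String) (max_line_length : Int) : String :=
  if PySem.Str.len equation > max_line_length then
    PySem.Str.replace equation " AND " " \nAND "
  else equation

-- ===== PRECONDITION & SPEC =====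
def Spec_format_equation_pretty (equation : String) (max_line_length : Int) (out : String) : Prop := out = format_equation_pretty_alt equation max_line_length
instance (equation : String) (max_line_length : Int) (out : String) : Decidable (Spec_format_equation_pretty equation max_line_length out) := by unfold Spec_format_equation_pretty; infer_instance

-- ===== CLAIM (what is proved, stated in full; the proofs are below) =====
def Claim_equal_format_equation_pretty : Prop := ∀ (equation : String) (max_line_length : Int), Dom_format_equation_pretty equation max_line_length → Spec_format_equation_pretty equation max_line_length (format_equation_pretty equation max_line_length)

-- ===== LEMMAS AND PROOFS =====

-- The common scan underlying both splitOn and replace: first piece and the later pieces.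
def pvScan (sep : List Char) : Nat → List Char → List Char × List (List Char)
  | 0, l => (l, [])
  | _ + 1, [] => ([], [])
  | fuel + 1, c :: t =>
      if sep.isPrefixOf (c :: t) then
        let r := pvScan sep fuel (List.drop sep.length (c :: t))
        ([], r.1 :: r.2)
      else
        let r := pvScan sep fuel t
        (c :: r.1, r.2)

theorem pvScan_fuel (sep : List Char) (hsep : sep ≠ []) :
    ∀ (fuel fuel' : Nat) (l : List Char), l.length ≤ fuel → l.length ≤ fuel' →
      pvScan sep fuel l = pvScan sep fuel' l := by
  intro fuel
  induction fuel with
  | zero =>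
    intro fuel' l hl _
    have : l = [] := List.length_eq_zero_iff.mp (Nat.le_zero.mp hl)
    subst this
    cases fuel' <;> simp [pvScan]
  | succ f ih =>
    intro fuel' l hl hl'
    cases l with
    | nil => cases fuel' <;> simp [pvScan]
    | cons c t =>
      cases fuel' with
      | zero => simp at hl'
      | succ f' =>
        simp only [pvScan]
        by_cases hp : sep.isPrefixOf (c :: t)
        · have hslen : 1 ≤ sep.length := by
            cases sep with
            | nil => exact absurd rfl hsep
            | cons _ _ => simp
          have hple : sep.length ≤ (c :: t).length :=
            (List.isPrefixOf_iff_prefix.mp hp).length_le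
          have hd : (List.drop sep.length (c :: t)).length ≤ f := by
            simp only [List.length_drop]
            simp only [List.length_cons] at hl hple ⊢
            omega
          have hd' : (List.drop sep.length (c :: t)).length ≤ f' := by
            simp only [List.length_drop]
            simp only [List.length_cons] at hl' hple ⊢
            omega
          simp [hp, ih f' _ hd hd']
        · have ht : t.length ≤ f := by simp only [List.length_cons] at hl; omega
          have ht' : t.length ≤ f' := by simp only [List.length_cons] at hl'; omega
          simp [hp, ih f' t ht ht']

theorem splitOn_go_eq (sep : List Char) :
    ∀ (fuel : Nat) (l cur : List Char) (acc : List (List Char)),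
      PySem.Chars.splitOn.go sep fuel l cur acc =
        acc.reverse ++ (cur.reverse ++ (pvScan sep fuel l).1) :: (pvScan sep fuel l).2 := by
  intro fuel
  induction fuel with
  | zero => intro l cur acc; simp [PySem.Chars.splitOn.go, pvScan]
  | succ f ih =>
    intro l cur acc
    cases l with
    | nil => simp [PySem.Chars.splitOn.go, pvScan]
    | cons c t =>
      by_cases hp : sep.isPrefixOf (c :: t) <;>
        simp [PySem.Chars.splitOn.go, pvScan, hp, ih]

theorem replace_go_eq (old new : List Char) :
    ∀ (fuel : Nat) (l acc : List Char),
      PySem.Chars.replace.go old new fuel l acc =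
        acc.reverse ++ (pvScan old fuel l).1 ++ ((pvScan old fuel l).2.map (new ++ ·)).flatten := by
  intro fuel
  induction fuel with
  | zero => intro l acc; simp [PySem.Chars.replace.go, pvScan]
  | succ f ih =>
    intro l acc
    cases l with
    | nil => simp [PySem.Chars.replace.go, pvScan]
    | cons c t =>
      by_cases hp : old.isPrefixOf (c :: t) <;>
        simp [PySem.Chars.replace.go, pvScan, hp, ih]

theorem splitOn_eq_scan (s sep : List Char) :
    PySem.Chars.splitOn s sep =
      (pvScan sep (s.length + 1) s).1 :: (pvScan sep (s.length + 1) s).2 := by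
  simpa using splitOn_go_eq sep (s.length + 1) s [] []

theorem replace_eq_scan (s old new : List Char) (hold : old ≠ []) :
    PySem.Chars.replace s old new =
      (pvScan old s.length s).1 ++ ((pvScan old s.length s).2.map (new ++ ·)).flatten := by
  have h : old.isEmpty = false := by simpa [List.isEmpty_iff] using hold
  simpa [PySem.Chars.replace, h] using replace_go_eq old new s.length s []

theorem join_cons_flatten (sep x : List Char) :
    ∀ (xs : List (List Char)),
      PySem.Chars.join sep (x :: xs) = x ++ (xs.map (sep ++ ·)).flatten := by
  intro xs
  induction xs generalizing x with
  | nil => simp [PySem.Chars.join, List.intercalate]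
  | cons y ys ih =>
    rw [PySem.Chars.join_cons_cons, ih y]
    simp

theorem foldl_enum_fmt (pre : List Char) :
    ∀ (ps : List (List Char)) (n : Int) (acc : List (List Char)), 1 ≤ n →
      (PySem.List.enumerate ps n).foldl
          (fun acc ip => if ip.1 = 0 then acc ++ [ip.2] else acc ++ [pre ++ ip.2]) acc =
        acc ++ ps.map (pre ++ ·) := by
  intro ps
  induction ps with
  | nil => intro n acc _; simp [PySem.List.enumerate]
  | cons p ps ih =>
    intro n acc hn
    have hn0 : ¬ n = 0 := by omega
    simp only [PySem.List.enumerate, List.foldl_cons, hn0, if_false]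
    rw [ih (n + 1) _ (by omega)]
    simp

-- The key identity on code-point lists.
theorem chars_main (cs : List Char) :
    PySem.Chars.join " \n".toList
        ((PySem.List.enumerate (PySem.Chars.splitOn cs " AND ".toList)).foldl
          (fun acc ip => if ip.1 = 0 then acc ++ [ip.2] else acc ++ ["AND ".toList ++ ip.2]) []) =
      PySem.Chars.replace cs " AND ".toList " \nAND ".toList := by
  have hsep : " AND ".toList ≠ [] := by decide
  rw [splitOn_eq_scan, replace_eq_scan cs _ _ hsep]
  rw [pvScan_fuel " AND ".toList hsep (cs.length + 1) cs.length cs (by omega) (by omega)]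
  simp only [PySem.List.enumerate, List.foldl_cons]
  norm_num
  rw [foldl_enum_fmt "AND ".toList _ 1 _ (by omega), List.singleton_append,
    join_cons_flatten]
  have hnew : " \nAND ".toList = " \n".toList ++ "AND ".toList := by decide
  simp [hnew, List.map_map, Function.comp_def]

-- ===== VERDICT (by name: the statement is the Claim_ definition above) =====
theorem format_equation_pretty_spec : Claim_equal_format_equation_pretty := by
  intro equation max_line_length _
  unfold Spec_format_equation_pretty format_equation_pretty format_equation_pretty_alt
  by_cases h : PySem.Str.len equation > max_line_length
  · simp only [h, if_true]
    rw [PySem.Str.replace]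
    exact congrArg String.ofList (chars_main equation.toList)
  · rw [if_neg h, if_neg h]
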